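-- pv_equiv track=rewrite | github.com/ssjmarx/novelAI-tools | lorebook_key_sanity_checker.py | extract_entry_info
-- ===== SOURCE A (Python) =====
-- from typing import List, Dict, Any, Set, Tuple
--
-- def extract_entry_info(entry: Dict[str, Any]) -> Tuple[str, str, str]:
--     """
--     Extract the title, type, and description from a lorebook entry.
--     """
--     text = entry.get('text', '')
--     display_name = entry.get('displayName', '')
--
--     # Parse the text field to get title and type
--     lines = text.split('\n')
--     title = ""
--     entry_type = ""
--     description = ""
--
--     for line in lines:
--         if line.startswith('----'):
--             continue
--         elif line.startswith('Type:'):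
--             entry_type = line.replace('Type:', '').strip().lower()
--         elif line.strip() and not line.startswith('Type:'):
--             if not title:
--                 title = line.strip()
--             else:
--                 description += line.strip() + " "
--
--     # If no title found in text, use displayName
--     if not title and display_name:
--         title = display_name
--
--     return title, entry_type, description.strip()
-- ===== SOURCE B (Python) =====
-- def extract_entry_info(entry):
--     """
--     Extract the title, type, and description from a lorebook entry.
--     """
--     text = entry.get('text', '')
--     display_name = entry.get('displayName', '')
--
--     lines = text.split('\n')
--     content = [line.strip() for line in lines
--                if line.strip()
--                and not line.startswith('----')
--                and not line.startswith('Type:')]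
--     type_lines = [line for line in lines if line.startswith('Type:')]
--     entry_type = type_lines[-1].replace('Type:', '').strip().lower() if type_lines else ''
--     title = content[0] if content else display_name
--     description = ' '.join(content[1:])
--     return title, entry_type, description
-- ===== Notes on version B (the rewrite author's own statement) =====
-- stated objective: simpler
-- what changed: Replaces A's single stateful loop (title-found flag, running description string, mutable entry_type) by two declarative filtering passes: a comprehension collecting stripped content lines (head = title, tail joined with ' ' = description) and a separate pass taking the last 'Type:' line for entry_type.
import Mathlib
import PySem

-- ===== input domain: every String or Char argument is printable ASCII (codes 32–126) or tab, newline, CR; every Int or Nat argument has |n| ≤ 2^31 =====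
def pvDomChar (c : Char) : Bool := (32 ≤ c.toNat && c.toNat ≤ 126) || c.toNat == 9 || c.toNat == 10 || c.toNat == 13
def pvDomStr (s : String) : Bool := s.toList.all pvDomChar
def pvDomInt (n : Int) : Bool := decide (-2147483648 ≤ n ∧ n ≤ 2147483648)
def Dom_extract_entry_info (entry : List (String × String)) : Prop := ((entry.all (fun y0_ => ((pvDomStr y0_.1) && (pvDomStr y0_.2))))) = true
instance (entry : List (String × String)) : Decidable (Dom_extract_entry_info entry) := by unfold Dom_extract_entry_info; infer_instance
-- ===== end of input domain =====

-- B replaces A's stateful one-pass flag loop by two independent filtering passes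
-- (content lines and the last 'Type:' line) plus a head/tail split and a single join;
-- objective: simpler.  Strings are handled as List Char (PySem.Chars) and packed with
-- String.ofList at the end, exact per PySem.

-- ===== PORT A =====
-- loop body of A: state is (title, entry_type, description)
def pvAStep (st : List Char × List Char × List Char) (line : List Char) :
    List Char × List Char × List Char :=
  if PySem.Chars.startswith line "----".toList then st
  else if PySem.Chars.startswith line "Type:".toList then
    (st.1, PySem.Chars.lower (PySem.Chars.strip (PySem.Chars.replace line "Type:".toList [])), st.2.2)
  else if PySem.Chars.strip line ≠ [] ∧ ¬ PySem.Chars.startswith line "Type:".toList then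
    (if st.1 = [] then (PySem.Chars.strip line, st.2.1, st.2.2)
     else (st.1, st.2.1, st.2.2 ++ PySem.Chars.strip line ++ [' ']))
  else st

def extract_entry_info (entry : List (String × String)) : String × String × String :=
  let text := (PySem.Dict.mk entry).getD "text" ""
  let display_name := (PySem.Dict.mk entry).getD "displayName" ""
  let lines := PySem.Chars.splitOn text.toList "\n".toList
  let st := lines.foldl pvAStep ([], [], [])
  let title := st.1
  let entry_type := st.2.1
  let description := st.2.2
  let title := if title = [] ∧ display_name.toList ≠ [] then display_name.toList else title
  (String.ofList title, String.ofList entry_type, String.ofList (PySem.Chars.strip description))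

-- ===== PORT B =====
-- B-side helper predicates (the comprehension filters / Type:-value expression of Source B)
def pvTypeVal (l : List Char) : List Char :=
  PySem.Chars.lower (PySem.Chars.strip (PySem.Chars.replace l "Type:".toList []))

def pvIsType (l : List Char) : Bool := PySem.Chars.startswith l "Type:".toList

def pvIsContent (l : List Char) : Bool :=
  !decide (PySem.Chars.strip l = []) &&
    (!PySem.Chars.startswith l "----".toList && !PySem.Chars.startswith l "Type:".toList)

def extract_entry_info_alt (entry : List (String × String)) : String × String × String :=
  let text := (PySem.Dict.mk entry).getD "text" ""
  let display_name := (PySem.Dict.mk entry).getD "displayName" ""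
  let lines := PySem.Chars.splitOn text.toList "\n".toList
  let content := (lines.filter pvIsContent).map PySem.Chars.strip
  let type_lines := lines.filter pvIsType
  let entry_type :=
    if type_lines.isEmpty then []
    else match PySem.List.pyGet? type_lines (-1) with
      | some t => pvTypeVal t
      | none => []   -- unreachable: type_lines is nonempty
  let title := match content with
    | [] => display_name.toList
    | h :: _ => h
  let description := PySem.Chars.join [' '] (content.drop 1)
  (String.ofList title, String.ofList entry_type, String.ofList description)

-- ===== PRECONDITION & SPEC =====
def Spec_extract_entry_info (entry : List (String × String)) (out : String × String × String) : Prop := out = extract_entry_info_alt entry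
instance (entry : List (String × String)) (out : String × String × String) : Decidable (Spec_extract_entry_info entry out) := by unfold Spec_extract_entry_info; infer_instance

-- ===== CLAIM (what is proved, stated in full; the proofs are below) =====
def Claim_equal_extract_entry_info : Prop := ∀ (entry : List (String × String)), Dom_extract_entry_info entry → Spec_extract_entry_info entry (extract_entry_info entry)

-- ===== LEMMAS AND PROOFS =====

def pvPieces (cs : List (List Char)) : List Char := (cs.map (· ++ [' '])).flatten

-- a '----' line is never a 'Type:' line
lemma pv_dash_not_type (l : List Char) (h : PySem.Chars.startswith l "----".toList = true) :
    ¬ PySem.Chars.startswith l "Type:".toList = true := by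
  intro h2
  rw [PySem.Chars.startswith_iff] at h h2
  obtain ⟨u, hu⟩ := h
  obtain ⟨v, hv⟩ := h2
  rw [show "----".toList = ['-','-','-','-'] from rfl] at hu
  rw [show "Type:".toList = ['T','y','p','e',':'] from rfl] at hv
  rw [← hu] at hv
  simp at hv

-- the entry_type component of A's loop is the value of the last 'Type:' line
lemma pv_loop_etype (lines : List (List Char)) (t e d : List Char) :
    (lines.foldl pvAStep (t, e, d)).2.1 =
      match (lines.filter pvIsType).getLast? with
      | none => e
      | some l => pvTypeVal l := by
  induction lines generalizing t e d with
  | nil => simp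
  | cons l ls ih =>
    simp only [List.foldl_cons, List.filter_cons]
    by_cases h1 : PySem.Chars.startswith l "----".toList = true
    · have h2 := pv_dash_not_type l h1
      have h1' : PySem.Chars.startswith l ['-','-','-','-'] = true := by simpa using h1
      have h2' : PySem.Chars.startswith l ['T','y','p','e',':'] = false := by simpa using h2
      have hT : pvIsType l = false := by simp [pvIsType, h2']
      have hstep : pvAStep (t, e, d) l = (t, e, d) := by simp [pvAStep, h1']
      rw [hstep, hT, if_neg Bool.false_ne_true]
      exact ih t e d
    · by_cases h2 : PySem.Chars.startswith l "Type:".toList = true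
      · have hT : pvIsType l = true := by simpa [pvIsType] using h2
        have h1' : PySem.Chars.startswith l ['-','-','-','-'] = false := by simpa using h1
        have h2' : PySem.Chars.startswith l ['T','y','p','e',':'] = true := by simpa using h2
        have hstep : pvAStep (t, e, d) l = (t, pvTypeVal l, d) := by
          simp [pvAStep, h1', h2', pvTypeVal]
        rw [hstep, hT, if_pos rfl, ih]
        cases hx : (ls.filter pvIsType).getLast? with
        | none =>
          have hnil : ls.filter pvIsType = [] := List.getLast?_eq_none_iff.mp hx
          rw [hnil]
          simp
        | some x =>
          rw [List.getLast?_cons, hx]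
          simp
      · have h2' : PySem.Chars.startswith l ['T','y','p','e',':'] = false := by simpa using h2
        have hT : pvIsType l = false := by simp [pvIsType, h2']
        rw [hT, if_neg Bool.false_ne_true]
        show (List.foldl pvAStep (pvAStep (t, e, d) l) ls).2.1 = _
        unfold pvAStep
        rw [if_neg h1, if_neg h2]
        by_cases h3 : PySem.Chars.strip l ≠ [] ∧ ¬ PySem.Chars.startswith l "Type:".toList = true
        · rw [if_pos h3]
          by_cases h4 : t = []
          · rw [if_pos h4]; exact ih _ e d
          · rw [if_neg h4]; exact ih t e _
        · rw [if_neg h3]; exact ih t e d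

-- when the title is already set, A's loop keeps it and appends all content pieces
lemma pv_loop_pos (lines : List (List Char)) (t e d : List Char) (ht : t ≠ []) :
    (lines.foldl pvAStep (t, e, d)).1 = t ∧
    (lines.foldl pvAStep (t, e, d)).2.2 =
      d ++ pvPieces ((lines.filter pvIsContent).map PySem.Chars.strip) := by
  induction lines generalizing e d with
  | nil => simp [pvPieces]
  | cons l ls ih =>
    simp only [List.foldl_cons, List.filter_cons]
    by_cases h1 : PySem.Chars.startswith l "----".toList = true
    · have h1' : PySem.Chars.startswith l ['-','-','-','-'] = true := by simpa using h1
      have hc : pvIsContent l = false := by simp [pvIsContent, h1']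
      have hstep : pvAStep (t, e, d) l = (t, e, d) := by simp [pvAStep, h1']
      rw [hstep, hc, if_neg Bool.false_ne_true]
      exact ih e d
    · by_cases h2 : PySem.Chars.startswith l "Type:".toList = true
      · have h1' : PySem.Chars.startswith l ['-','-','-','-'] = false := by simpa using h1
        have h2' : PySem.Chars.startswith l ['T','y','p','e',':'] = true := by simpa using h2
        have hc : pvIsContent l = false := by simp [pvIsContent, h2']
        have hstep : pvAStep (t, e, d) l = (t, pvTypeVal l, d) := by
          simp [pvAStep, h1', h2', pvTypeVal]
        rw [hstep, hc, if_neg Bool.false_ne_true]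
        exact ih _ d
      · by_cases h3 : PySem.Chars.strip l = []
        · have h1' : PySem.Chars.startswith l ['-','-','-','-'] = false := by simpa using h1
          have h2' : PySem.Chars.startswith l ['T','y','p','e',':'] = false := by simpa using h2
          have hc : pvIsContent l = false := by simp [pvIsContent, h3]
          have hstep : pvAStep (t, e, d) l = (t, e, d) := by
            simp [pvAStep, h1', h2', h3]
          rw [hstep, hc, if_neg Bool.false_ne_true]
          exact ih e d
        · have h1' : PySem.Chars.startswith l ['-','-','-','-'] = false := by simpa using h1
          have h2' : PySem.Chars.startswith l ['T','y','p','e',':'] = false := by simpa using h2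
          have hc : pvIsContent l = true := by simp [pvIsContent, h1', h2', h3]
          have hstep : pvAStep (t, e, d) l = (t, e, d ++ PySem.Chars.strip l ++ [' ']) := by
            simp [pvAStep, h1', h2', h3, ht]
          rw [hstep, hc, if_pos rfl]
          refine ⟨(ih e _).1, ?_⟩
          rw [(ih e _).2]
          simp [pvPieces, List.append_assoc]

-- from the empty title, A's loop takes the first content line as title
lemma pv_loop_zero (lines : List (List Char)) (e d : List Char) :
    (lines.foldl pvAStep ([], e, d)).1 =
      (match (lines.filter pvIsContent).map PySem.Chars.strip with
        | [] => ([] : List Char)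
        | h :: _ => h) ∧
    (lines.foldl pvAStep ([], e, d)).2.2 =
      d ++ pvPieces (((lines.filter pvIsContent).map PySem.Chars.strip).drop 1) := by
  induction lines generalizing e d with
  | nil => simp [pvPieces]
  | cons l ls ih =>
    simp only [List.foldl_cons, List.filter_cons]
    by_cases h1 : PySem.Chars.startswith l "----".toList = true
    · have h1' : PySem.Chars.startswith l ['-','-','-','-'] = true := by simpa using h1
      have hc : pvIsContent l = false := by simp [pvIsContent, h1']
      have hstep : pvAStep ([], e, d) l = ([], e, d) := by simp [pvAStep, h1']
      rw [hstep, hc, if_neg Bool.false_ne_true]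
      exact ih e d
    · by_cases h2 : PySem.Chars.startswith l "Type:".toList = true
      · have h1' : PySem.Chars.startswith l ['-','-','-','-'] = false := by simpa using h1
        have h2' : PySem.Chars.startswith l ['T','y','p','e',':'] = true := by simpa using h2
        have hc : pvIsContent l = false := by simp [pvIsContent, h2']
        have hstep : pvAStep ([], e, d) l = ([], pvTypeVal l, d) := by
          simp [pvAStep, h1', h2', pvTypeVal]
        rw [hstep, hc, if_neg Bool.false_ne_true]
        exact ih _ d
      · by_cases h3 : PySem.Chars.strip l = []
        · have h1' : PySem.Chars.startswith l ['-','-','-','-'] = false := by simpa using h1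
          have h2' : PySem.Chars.startswith l ['T','y','p','e',':'] = false := by simpa using h2
          have hc : pvIsContent l = false := by simp [pvIsContent, h3]
          have hstep : pvAStep ([], e, d) l = ([], e, d) := by
            simp [pvAStep, h1', h2', h3]
          rw [hstep, hc, if_neg Bool.false_ne_true]
          exact ih e d
        · have h1' : PySem.Chars.startswith l ['-','-','-','-'] = false := by simpa using h1
          have h2' : PySem.Chars.startswith l ['T','y','p','e',':'] = false := by simpa using h2
          have hc : pvIsContent l = true := by simp [pvIsContent, h1', h2', h3]
          have hstep : pvAStep ([], e, d) l = (PySem.Chars.strip l, e, d) := by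
            simp [pvAStep, h1', h2', h3]
          rw [hstep, hc, if_pos rfl]
          have hpos := pv_loop_pos ls (PySem.Chars.strip l) e d h3
          simp only [List.map_cons, List.drop_succ_cons, List.drop_zero]
          exact ⟨hpos.1, hpos.2⟩

-- a dropWhile-fixed list does not start with a matching element
lemma pv_dropWhile_fixed_head {α : Type} (p : α → Bool) (x : α) (xs : List α)
    (h : List.dropWhile p (x :: xs) = x :: xs) : p x = false := by
  cases hpx : p x with
  | false => rfl
  | true =>
    rw [List.dropWhile_cons_of_pos hpx] at h
    have hlen := List.IsSuffix.length_le (List.dropWhile_suffix (l := xs) p)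
    rw [h] at hlen
    simp at hlen

-- strip is idempotent; a nonempty stripped list has non-space first and last chars
lemma pv_lstrip_fixed_of_strip_fixed (l : List Char) (h : PySem.Chars.strip l = l) :
    PySem.Chars.lstrip l = l := by
  have hsuf : PySem.Chars.lstrip l <:+ l := List.dropWhile_suffix _
  have hpre : PySem.Chars.strip l <+: PySem.Chars.lstrip l := by
    unfold PySem.Chars.strip PySem.Chars.rstrip
    obtain ⟨w, hw⟩ := List.dropWhile_suffix (l := (PySem.Chars.lstrip l).reverse) PySem.Chars.isspace
    exact ⟨w.reverse, by rw [← List.reverse_append, hw, List.reverse_reverse]⟩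
  have h1 := List.IsSuffix.length_le hsuf
  have h2 := List.IsPrefix.length_le hpre
  rw [h] at h2
  exact List.IsSuffix.eq_of_length hsuf (by omega)

lemma pv_rstrip_fixed_of_strip_fixed (l : List Char) (h : PySem.Chars.strip l = l) :
    PySem.Chars.rstrip l = l := by
  have hl := pv_lstrip_fixed_of_strip_fixed l h
  unfold PySem.Chars.strip at h
  rw [hl] at h
  exact h

lemma pv_strip_idem (l : List Char) :
    PySem.Chars.strip (PySem.Chars.strip l) = PySem.Chars.strip l := by
  unfold PySem.Chars.strip
  have h1 : PySem.Chars.lstrip (PySem.Chars.rstrip (PySem.Chars.lstrip l)) =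
      PySem.Chars.rstrip (PySem.Chars.lstrip l) := by
    cases hr : PySem.Chars.rstrip (PySem.Chars.lstrip l) with
    | nil => rfl
    | cons x xs =>
      have hpre : (x :: xs) <+: PySem.Chars.lstrip l := by
        rw [← hr]
        unfold PySem.Chars.rstrip
        obtain ⟨w, hw⟩ := List.dropWhile_suffix (l := (PySem.Chars.lstrip l).reverse) PySem.Chars.isspace
        exact ⟨w.reverse, by rw [← List.reverse_append, hw, List.reverse_reverse]⟩
      obtain ⟨w, hw⟩ := hpre
      have hfix : List.dropWhile PySem.Chars.isspace (x :: (xs ++ w)) = x :: (xs ++ w) := by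
        have hx : PySem.Chars.lstrip l = x :: (xs ++ w) := by rw [← hw]; rfl
        rw [← hx]
        exact List.dropWhile_idempotent PySem.Chars.isspace l
      have hx := pv_dropWhile_fixed_head _ _ _ hfix
      unfold PySem.Chars.lstrip
      rw [List.dropWhile_cons_of_neg (by rw [hx]; simp)]
  rw [h1]
  unfold PySem.Chars.rstrip
  rw [List.reverse_reverse, List.dropWhile_idempotent]

-- rstrip distributes over append
lemma pv_rstrip_append_of_ne (u v : List Char) (h : PySem.Chars.rstrip v ≠ []) :
    PySem.Chars.rstrip (u ++ v) = u ++ PySem.Chars.rstrip v := by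
  unfold PySem.Chars.rstrip at *
  rw [List.reverse_append, List.dropWhile_append]
  have hne : (List.dropWhile PySem.Chars.isspace v.reverse).isEmpty = false := by
    cases hd : List.dropWhile PySem.Chars.isspace v.reverse with
    | nil => exact absurd (by rw [hd]; rfl) h
    | cons a as => rfl
  rw [hne]
  simp

lemma pv_rstrip_append_of_fixed (u v : List Char) (h : PySem.Chars.rstrip u = u) :
    PySem.Chars.rstrip (u ++ v) = u ++ PySem.Chars.rstrip v := by
  by_cases hv : PySem.Chars.rstrip v = []
  · unfold PySem.Chars.rstrip at *
    rw [List.reverse_append, List.dropWhile_append]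
    have hv' : List.dropWhile PySem.Chars.isspace v.reverse = [] := by
      have := congrArg List.reverse hv
      simpa using this
    have hu' : List.dropWhile PySem.Chars.isspace u.reverse = u.reverse := by
      have := congrArg List.reverse h
      simpa using this
    simp [hv', hu']
  · exact pv_rstrip_append_of_ne u v hv

lemma pv_intercalate_cons₂ (sep a b : List Char) (t : List (List Char)) :
    sep.intercalate (a :: b :: t) = a ++ sep ++ sep.intercalate (b :: t) := by
  simp [List.intercalate, List.append_assoc]

-- rstrip of the appended pieces is the single-space intercalation
lemma pv_rstrip_pieces (cs : List (List Char))
    (h : ∀ c ∈ cs, c ≠ [] ∧ PySem.Chars.strip c = c) :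
    PySem.Chars.rstrip (pvPieces cs) = List.intercalate [' '] cs ∧
      (cs ≠ [] → List.intercalate [' '] cs ≠ []) := by
  induction cs with
  | nil => exact ⟨by decide, by simp⟩
  | cons c tl ih =>
    obtain ⟨hc0, hcfix⟩ := h c (List.mem_cons_self ..)
    have hcr := pv_rstrip_fixed_of_strip_fixed c hcfix
    have htl := ih (fun x hx => h x (List.mem_cons_of_mem _ hx))
    have hp : pvPieces (c :: tl) = c ++ ([' '] ++ pvPieces tl) := by
      simp [pvPieces]
    cases tl with
    | nil =>
      rw [hp, pv_rstrip_append_of_fixed _ _ hcr]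
      have h0 : PySem.Chars.rstrip ([' '] ++ pvPieces []) = [] := by
        show PySem.Chars.rstrip [' '] = []
        decide
      rw [h0]
      refine ⟨by simp [List.intercalate], fun _ => ?_⟩
      simp [List.intercalate, hc0]
    | cons b tl' =>
      rw [hp, pv_rstrip_append_of_fixed _ _ hcr,
        pv_rstrip_append_of_ne _ _ (by rw [htl.1]; exact htl.2 (by simp)),
        htl.1, pv_intercalate_cons₂]
      exact ⟨by simp [List.append_assoc], fun _ => by simp [hc0]⟩

lemma pv_strip_pieces (cs : List (List Char))
    (h : ∀ c ∈ cs, c ≠ [] ∧ PySem.Chars.strip c = c) :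
    PySem.Chars.strip (pvPieces cs) = PySem.Chars.join [' '] cs := by
  cases cs with
  | nil => decide
  | cons c tl =>
    obtain ⟨hc0, hcfix⟩ := h c (List.mem_cons_self ..)
    unfold PySem.Chars.strip
    have hl : PySem.Chars.lstrip (pvPieces (c :: tl)) = pvPieces (c :: tl) := by
      obtain ⟨x, xs, hc⟩ : ∃ x xs, c = x :: xs := by
        cases c with
        | nil => exact absurd rfl hc0
        | cons a b => exact ⟨a, b, rfl⟩
      have hfix := pv_lstrip_fixed_of_strip_fixed c hcfix
      rw [hc] at hfix
      have hx : PySem.Chars.isspace x = false := pv_dropWhile_fixed_head _ _ _ hfix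
      have hpc : pvPieces (c :: tl) = x :: (xs ++ ([' '] ++ pvPieces tl)) := by
        simp [pvPieces, hc]
      rw [hpc]
      unfold PySem.Chars.lstrip
      rw [List.dropWhile_cons_of_neg (by rw [hx]; simp)]
    rw [hl, (pv_rstrip_pieces (c :: tl) h).1]
    rfl

lemma pv_pyGet_neg_one {α : Type} (xs : List α) : PySem.List.pyGet? xs (-1) = xs.getLast? := by
  cases xs with
  | nil => rfl
  | cons a tl =>
    simp only [PySem.List.pyGet?, PySem.List.pyIdx?]
    have h1 : ¬ ((0:Int) ≤ -1) := by omega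
    have h2 : -(((a :: tl).length : Nat) : Int) ≤ -1 := by
      simp only [List.length_cons]
      push_cast
      omega
    rw [if_neg h1, if_pos h2]
    simp [List.getLast?_eq_getElem?]

-- the two ports, written without lets and with the proof abbreviations (definitional)
lemma pv_a_eq (entry : List (String × String)) :
    extract_entry_info entry =
      (String.ofList
        (if ((PySem.Chars.splitOn ((PySem.Dict.mk entry).getD "text" "").toList "\n".toList).foldl pvAStep ([], [], [])).1 = [] ∧
            ((PySem.Dict.mk entry).getD "displayName" "").toList ≠ []
          then ((PySem.Dict.mk entry).getD "displayName" "").toList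
          else ((PySem.Chars.splitOn ((PySem.Dict.mk entry).getD "text" "").toList "\n".toList).foldl pvAStep ([], [], [])).1),
       String.ofList ((PySem.Chars.splitOn ((PySem.Dict.mk entry).getD "text" "").toList "\n".toList).foldl pvAStep ([], [], [])).2.1,
       String.ofList (PySem.Chars.strip ((PySem.Chars.splitOn ((PySem.Dict.mk entry).getD "text" "").toList "\n".toList).foldl pvAStep ([], [], [])).2.2)) := rfl

lemma pv_alt_eq (entry : List (String × String)) :
    extract_entry_info_alt entry =
      (String.ofList
        (match ((PySem.Chars.splitOn ((PySem.Dict.mk entry).getD "text" "").toList "\n".toList).filter pvIsContent).map PySem.Chars.strip with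
          | [] => ((PySem.Dict.mk entry).getD "displayName" "").toList
          | h :: _ => h),
       String.ofList
        (if ((PySem.Chars.splitOn ((PySem.Dict.mk entry).getD "text" "").toList "\n".toList).filter pvIsType).isEmpty then []
         else
           match PySem.List.pyGet? ((PySem.Chars.splitOn ((PySem.Dict.mk entry).getD "text" "").toList "\n".toList).filter pvIsType) (-1) with
           | some t => pvTypeVal t
           | none => []),
       String.ofList
        (PySem.Chars.join [' ']
          ((((PySem.Chars.splitOn ((PySem.Dict.mk entry).getD "text" "").toList "\n".toList).filter pvIsContent).map PySem.Chars.strip).drop 1))) := rfl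

-- ===== VERDICT (by name: the statement is the Claim_ definition above) =====
theorem extract_entry_info_spec : Claim_equal_extract_entry_info := by
  intro entry _
  show extract_entry_info entry = extract_entry_info_alt entry
  rw [pv_a_eq, pv_alt_eq]
  generalize hL : PySem.Chars.splitOn ((PySem.Dict.mk entry).getD "text" "").toList "\n".toList = L
  generalize hdn : ((PySem.Dict.mk entry).getD "displayName" "").toList = dnl
  have hz := pv_loop_zero L [] []
  have he := pv_loop_etype L [] [] []
  have hmem : ∀ c ∈ (L.filter pvIsContent).map PySem.Chars.strip,
      c ≠ [] ∧ PySem.Chars.strip c = c := by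
    intro c hcin
    obtain ⟨l, hl, hcl⟩ := List.mem_map.mp hcin
    have hfc := (List.mem_filter.mp hl).2
    simp only [pvIsContent, Bool.and_eq_true, Bool.not_eq_true', decide_eq_false_iff_not] at hfc
    exact ⟨hcl ▸ hfc.1, hcl ▸ pv_strip_idem l⟩
  refine congrArg₂ Prod.mk ?_ (congrArg₂ Prod.mk ?_ ?_)
  -- title
  · rw [hz.1]
    cases hC : (L.filter pvIsContent).map PySem.Chars.strip with
    | nil =>
      by_cases hd : dnl = []
      · simp [hd]
      · simp [hd]
    | cons h tlc =>
      have hne : h ≠ [] := (hmem h (by rw [hC]; simp)).1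
      simp [hne]
  -- entry_type
  · rw [he, pv_pyGet_neg_one]
    cases hx : (L.filter pvIsType).getLast? with
    | none =>
      have hnil : L.filter pvIsType = [] := List.getLast?_eq_none_iff.mp hx
      rw [hnil]
      simp
    | some x =>
      have hne : (L.filter pvIsType).isEmpty = false := by
        cases hF : L.filter pvIsType with
        | nil => rw [hF] at hx; simp at hx
        | cons a as => rfl
      rw [hne, if_neg Bool.false_ne_true]
  -- description
  · rw [hz.2, List.nil_append,
      pv_strip_pieces _ (fun c hc => hmem c (List.mem_of_mem_drop hc))]
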